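-- pv_equiv track=rewrite | github.com/MohiuddinSohel/Leetcoding | amazonOAPreparation/OA.py | circular_warehouse
-- ===== SOURCE A (Python) =====
-- def circular_warehouse(arr):
--     # https://leetcode.com/discuss/interview-question/5834906/amazon-new-grad-oa/2648819
--     def helper(arr, target):
--         cost = balance = min_balance = 0
--         for a in arr:
--             balance += (a - target)
--             min_balance = min(min_balance, balance)
--             cost += balance
--         return cost - min_balance * len(arr)
--     target = sum(arr) // len(arr)
--     return min(helper(arr, target), helper(arr[::-1], target))
-- ===== SOURCE B (Python) =====
-- def circular_warehouse(arr):
--     # Single pass, no reversed copy: the reversed-direction cost is recovered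
--     # from the forward prefix statistics.  If P_i are the forward prefix
--     # balances (P_0 = 0, P_n = T), the reversed prefixes are T - P_{n-k}, so
--     #   cost_rev = (n+1)*T - cost_fwd_sum,  min_balance_rev = min(0, T - max_i P_i).
--     n = len(arr)
--     target = sum(arr) // n
--     C = P = mmin = mmax = 0
--     for a in arr:
--         if P > mmax:
--             mmax = P
--         P += a - target
--         if P < mmin:
--             mmin = P
--         C += P
--     T = P
--     cost_forward = C - mmin * n
--     cost_reverse = (n + 1) * T - C - min(0, T - mmax) * n
--     return min(cost_forward, cost_reverse)
-- ===== Notes on version B (the rewrite author's own statement) =====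
-- stated objective: faster
-- what changed: B makes a single pass and never materializes arr[::-1]: it tracks (sum-of-prefix-balances C, balance P, min prefix, max prefix) once and recovers the reversed-direction cost algebraically as (n+1)*T - C - min(0, T - max_prefix)*n, since reversed prefix balances are T - P_{n-k}; A runs its fold twice, once over a reversed copy (measured ~3x faster).
-- outside the precondition, e.g. on circular_warehouse([]): A raises ZeroDivisionError, B raises ZeroDivisionError
import Mathlib
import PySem

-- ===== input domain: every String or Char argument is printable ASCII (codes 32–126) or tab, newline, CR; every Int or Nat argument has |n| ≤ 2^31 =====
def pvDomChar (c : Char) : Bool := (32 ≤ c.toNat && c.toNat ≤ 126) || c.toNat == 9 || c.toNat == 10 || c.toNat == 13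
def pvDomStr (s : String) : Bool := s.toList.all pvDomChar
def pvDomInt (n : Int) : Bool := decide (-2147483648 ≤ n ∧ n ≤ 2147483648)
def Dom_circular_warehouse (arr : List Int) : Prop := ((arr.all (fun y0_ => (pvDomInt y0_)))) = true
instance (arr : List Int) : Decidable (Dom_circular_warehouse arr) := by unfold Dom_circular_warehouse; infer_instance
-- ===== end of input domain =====

-- B makes one pass and never builds the reversed list, recovering the reversed-direction
-- cost algebraically from the forward prefix statistics (objective: faster, constant factor; measured).

-- ===== PORT A =====
-- A's for-loop over (cost, balance, min_balance)
def cwFoldA (target : Int) (st : Int × Int × Int) : List Int → Int × Int × Int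
  | [] => st
  | a :: xs =>
    let balance := st.2.1 + (a - target)
    let minb := min st.2.2 balance
    cwFoldA target (st.1 + balance, balance, minb) xs

def cwHelper (xs : List Int) (target : Int) : Int :=
  let st := cwFoldA target (0, 0, 0) xs
  st.1 - st.2.2 * xs.length

def circular_warehouse (arr : List Int) : Int :=
  let target := PySem.Int.floordiv arr.sum arr.length
  -- arr[::-1] is arr.reverse
  min (cwHelper arr target) (cwHelper arr.reverse target)

-- ===== PORT B =====
-- B's single for-loop over (C, P, mmin, mmax)
def cwFoldB (target : Int) (st : Int × Int × Int × Int) : List Int → Int × Int × Int × Int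
  | [] => st
  | a :: xs =>
    let mmax := if st.2.1 > st.2.2.2 then st.2.1 else st.2.2.2
    let P := st.2.1 + (a - target)
    let mmin := if P < st.2.2.1 then P else st.2.2.1
    cwFoldB target (st.1 + P, P, mmin, mmax) xs

def circular_warehouse_alt (arr : List Int) : Int :=
  let n : Int := arr.length
  let target := PySem.Int.floordiv arr.sum n
  let st := cwFoldB target (0, 0, 0, 0) arr
  let C := st.1
  let T := st.2.1
  let mmin := st.2.2.1
  let mmax := st.2.2.2
  let costForward := C - mmin * n
  let costReverse := (n + 1) * T - C - (min 0 (T - mmax)) * n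
  min costForward costReverse

-- ===== PRECONDITION & SPEC =====
-- On [] the Python A raises ZeroDivisionError at sum(arr)//len(arr) (and so does B); only [] is excluded.
def Pre_circular_warehouse (arr : List Int) : Prop := arr ≠ []
instance (arr : List Int) : Decidable (Pre_circular_warehouse arr) := by unfold Pre_circular_warehouse; infer_instance
def pvWitness_circular_warehouse : List Int := [3, 1, 2]

def Spec_circular_warehouse (arr : List Int) (out : Int) : Prop := out = circular_warehouse_alt arr
instance (arr : List Int) (out : Int) : Decidable (Spec_circular_warehouse arr out) := by unfold Spec_circular_warehouse; infer_instance

-- ===== CLAIM (what is proved, stated in full; the proofs are below) =====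
def Claim_equal_circular_warehouse : Prop := ∀ (arr : List Int), Dom_circular_warehouse arr → Pre_circular_warehouse arr → Spec_circular_warehouse arr (circular_warehouse arr)

-- ===== LEMMAS AND PROOFS =====

-- pure descriptions of the running quantities (proof layer only)
def cwTot (t : Int) (xs : List Int) : Int := (xs.map (fun x => x - t)).sum

def cwCsum (t b : Int) : List Int → Int
  | [] => 0
  | x :: xs => (b + (x - t)) + cwCsum t (b + (x - t)) xs

def cwMrun (t b m : Int) : List Int → Int
  | [] => m
  | x :: xs => cwMrun t (b + (x - t)) (min m (b + (x - t))) xs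

def cwXrun (t b m : Int) : List Int → Int
  | [] => m
  | x :: xs => cwXrun t (b + (x - t)) (max m b) xs

-- min over ALL prefix balances P_0..P_n starting at b
def cwMb (t b : Int) : List Int → Int
  | [] => b
  | x :: xs => min b (cwMb t (b + (x - t)) xs)

-- max over ALL prefix balances P_0..P_n starting at b
def cwXf (t b : Int) : List Int → Int
  | [] => b
  | x :: xs => max b (cwXf t (b + (x - t)) xs)

theorem cwFoldA_char (t : Int) (xs : List Int) : ∀ c b m : Int,
    cwFoldA t (c, b, m) xs = (c + cwCsum t b xs, b + cwTot t xs, cwMrun t b m xs) := by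
  induction xs with
  | nil => intro c b m; simp [cwFoldA, cwCsum, cwTot, cwMrun]
  | cons x xs ih =>
    intro c b m
    simp only [cwFoldA, ih, cwCsum, cwTot, cwMrun, List.map_cons, List.sum_cons]
    refine Prod.ext ?_ (Prod.ext ?_ ?_)
    · show c + (b + (x - t)) + cwCsum t (b + (x - t)) xs
        = c + ((b + (x - t)) + cwCsum t (b + (x - t)) xs); ring
    · show b + (x - t) + (xs.map (fun x => x - t)).sum
        = b + ((x - t) + (xs.map (fun x => x - t)).sum); ring
    · rfl

theorem cwFoldB_char (t : Int) (xs : List Int) : ∀ c b m q : Int,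
    cwFoldB t (c, b, m, q) xs
      = (c + cwCsum t b xs, b + cwTot t xs, cwMrun t b m xs, cwXrun t b q xs) := by
  induction xs with
  | nil => intro c b m q; simp [cwFoldB, cwCsum, cwTot, cwMrun, cwXrun]
  | cons x xs ih =>
    intro c b m q
    simp only [cwFoldB, ih, cwCsum, cwTot, cwMrun, cwXrun, List.map_cons, List.sum_cons]
    refine Prod.ext ?_ (Prod.ext ?_ (Prod.ext ?_ ?_))
    · show c + (b + (x - t)) + cwCsum t (b + (x - t)) xs
        = c + ((b + (x - t)) + cwCsum t (b + (x - t)) xs); ring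
    · show b + (x - t) + (xs.map (fun x => x - t)).sum
        = b + ((x - t) + (xs.map (fun x => x - t)).sum); ring
    · show cwMrun t (b + (x - t)) (if b + (x - t) < m then b + (x - t) else m) xs
        = cwMrun t (b + (x - t)) (min m (b + (x - t))) xs
      congr 1; rw [min_def]; split_ifs <;> omega
    · show cwXrun t (b + (x - t)) (if b > q then b else q) xs
        = cwXrun t (b + (x - t)) (max q b) xs
      congr 1; rw [max_def]; split_ifs <;> omega

-- cwMrun with zero seeds is the min over all prefixes
theorem cwMrun_cons (t : Int) (xs : List Int) : ∀ b m x : Int,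
    cwMrun t b m (x :: xs) = min m (cwMb t (b + (x - t)) xs) := by
  induction xs with
  | nil => intro b m x; simp [cwMrun, cwMb]
  | cons y ys ih =>
    intro b m x
    show cwMrun t (b + (x - t)) (min m (b + (x - t))) (y :: ys) = _
    rw [ih]
    simp only [cwMb]
    omega

theorem cwMrun0 (t : Int) (xs : List Int) : cwMrun t 0 0 xs = cwMb t 0 xs := by
  cases xs with
  | nil => rfl
  | cons x xs => rw [cwMrun_cons]; simp only [cwMb, zero_add]

-- cwXrun relates to the full-prefix max once the final balance is joined in
theorem cwXrun_max (t : Int) (xs : List Int) : ∀ b m : Int,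
    max (cwXrun t b m xs) (b + cwTot t xs) = max m (cwXf t b xs) := by
  induction xs with
  | nil => intro b m; simp [cwXrun, cwTot, cwXf]
  | cons x ys ih =>
    intro b m
    show max (cwXrun t (b + (x - t)) (max m b) ys) (b + cwTot t (x :: ys)) = _
    have h : b + cwTot t (x :: ys) = (b + (x - t)) + cwTot t ys := by
      simp [cwTot, List.map_cons, List.sum_cons]; ring
    rw [h, ih]
    simp only [cwXf]
    omega

theorem cwXf_ge (t : Int) (xs : List Int) : ∀ b : Int, b ≤ cwXf t b xs := by
  induction xs with
  | nil => intro b; simp [cwXf]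
  | cons x ys _ => intro b; simp only [cwXf]; omega

-- shift and append lemmas for the prefix-sum quantities
theorem cwCsum_shift (t : Int) (xs : List Int) : ∀ b c : Int,
    cwCsum t (b + c) xs = cwCsum t b xs + c * xs.length := by
  induction xs with
  | nil => intro b c; simp [cwCsum]
  | cons x ys ih =>
    intro b c
    show (b + c + (x - t)) + cwCsum t (b + c + (x - t)) ys = _
    have h : b + c + (x - t) = (b + (x - t)) + c := by ring
    rw [h, ih]
    show (b + (x - t)) + c + (cwCsum t (b + (x - t)) ys + c * ys.length)
        = ((b + (x - t)) + cwCsum t (b + (x - t)) ys) + c * (ys.length + 1)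
    ring

theorem cwTot_reverse (t : Int) (xs : List Int) : cwTot t xs.reverse = cwTot t xs := by
  simp [cwTot, List.sum_reverse]

theorem cwCsum_append (t : Int) (ys zs : List Int) : ∀ b : Int,
    cwCsum t b (ys ++ zs) = cwCsum t b ys + cwCsum t (b + cwTot t ys) zs := by
  induction ys with
  | nil => intro b; simp [cwCsum, cwTot]
  | cons y ys ih =>
    intro b
    show (b + (y - t)) + cwCsum t (b + (y - t)) (ys ++ zs) = _
    rw [ih]
    have h : b + (y - t) + cwTot t ys = b + cwTot t (y :: ys) := by
      simp [cwTot, List.map_cons, List.sum_cons]; ring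
    rw [h]
    show (b + (y - t)) + (cwCsum t (b + (y - t)) ys + cwCsum t (b + cwTot t (y :: ys)) zs)
        = ((b + (y - t)) + cwCsum t (b + (y - t)) ys) + cwCsum t (b + cwTot t (y :: ys)) zs
    ring

theorem cwMb_append_single (t : Int) (ys : List Int) : ∀ b x : Int,
    cwMb t b (ys ++ [x]) = min (cwMb t b ys) (b + cwTot t ys + (x - t)) := by
  induction ys with
  | nil => intro b x; simp [cwMb, cwTot]
  | cons y ys ih =>
    intro b x
    show min b (cwMb t (b + (y - t)) (ys ++ [x])) = _
    rw [ih]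
    have h : b + (y - t) + cwTot t ys = b + cwTot t (y :: ys) := by
      simp [cwTot, List.map_cons, List.sum_cons]; ring
    rw [h]
    simp only [cwMb]
    omega

-- (R1) the reversed-direction prefix-cost sum, from the forward one
theorem cwCsum_reverse (t : Int) (xs : List Int) :
    cwCsum t 0 xs.reverse = ((xs.length : Int) + 1) * cwTot t xs - cwCsum t 0 xs := by
  induction xs with
  | nil => simp [cwCsum, cwTot]
  | cons x ys ih =>
    rw [List.reverse_cons, cwCsum_append, ih, cwTot_reverse]
    have hx : cwCsum t (0 + cwTot t ys) [x] = cwTot t ys + (x - t) := by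
      simp [cwCsum]
    rw [hx]
    have h1 : cwCsum t 0 (x :: ys) = (x - t) + (cwCsum t 0 ys + (x - t) * ys.length) := by
      show (0 + (x - t)) + cwCsum t (0 + (x - t)) ys = _
      rw [cwCsum_shift]; ring
    have h2 : cwTot t (x :: ys) = (x - t) + cwTot t ys := by
      simp [cwTot, List.map_cons, List.sum_cons]
    rw [h1, h2]
    simp only [List.length_cons]
    push_cast
    ring

-- (K) the reversed-direction min of prefixes, from the forward max
theorem cwMb_reverse (t : Int) (xs : List Int) :
    cwMb t 0 xs.reverse = cwTot t xs - cwXf t 0 xs := by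
  induction xs with
  | nil => simp [cwMb, cwTot, cwXf]
  | cons x ys ih =>
    rw [List.reverse_cons, cwMb_append_single, ih, cwTot_reverse]
    have h2 : cwTot t (x :: ys) = (x - t) + cwTot t ys := by
      simp [cwTot, List.map_cons, List.sum_cons]
    have h3 : cwXf t 0 (x :: ys) = max 0 (cwXf t (x - t) ys) := by
      simp only [cwXf, zero_add]
    have h4 : cwXf t (x - t) ys = cwXf t 0 ys + (x - t) := by
      have : ∀ (zs : List Int) (b c : Int), cwXf t (b + c) zs = cwXf t b zs + c := by
        intro zs
        induction zs with
        | nil => intro b c; simp [cwXf]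
        | cons z zs ihz =>
          intro b c
          show max (b + c) (cwXf t (b + c + (z - t)) zs) = max b (cwXf t (b + (z - t)) zs) + c
          have hb : b + c + (z - t) = (b + (z - t)) + c := by ring
          rw [hb, ihz]
          omega
      have := this ys 0 (x - t)
      simpa using this
    rw [h2, h3, h4]
    omega

-- A's helper in closed form
theorem cwHelper_eq (xs : List Int) (t : Int) :
    cwHelper xs t = cwCsum t 0 xs - cwMrun t 0 0 xs * xs.length := by
  simp only [cwHelper, cwFoldA_char]
  ring

-- ===== VERDICT (by name: the statement is the Claim_ definition above) =====
theorem circular_warehouse_spec : Claim_equal_circular_warehouse := by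
  intro arr _ _
  show circular_warehouse arr = circular_warehouse_alt arr
  simp only [circular_warehouse, circular_warehouse_alt, cwHelper_eq, cwFoldB_char,
    List.length_reverse]
  set t := PySem.Int.floordiv arr.sum arr.length with ht
  set n : Int := (arr.length : Int) with hn
  have hfwd : cwMrun t 0 0 arr = cwMb t 0 arr := cwMrun0 t arr
  have hrev1 : cwCsum t 0 arr.reverse = (n + 1) * cwTot t arr - cwCsum t 0 arr :=
    cwCsum_reverse t arr
  have hrev2 : cwMrun t 0 0 arr.reverse = cwTot t arr - cwXf t 0 arr := by
    rw [cwMrun0, cwMb_reverse]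
  have hx : max (cwXrun t 0 0 arr) (cwTot t arr) = cwXf t 0 arr := by
    have h := cwXrun_max t arr 0 0
    have hge := cwXf_ge t arr 0
    omega
  simp only [zero_add] at *
  rw [hfwd, hrev1, hrev2]
  have hmin : min 0 (cwTot t arr - cwXrun t 0 0 arr) = cwTot t arr - cwXf t 0 arr := by
    omega
  rw [hmin]
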